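-- pv_equiv track=rewrite | github.com/thealper2/codewars-solutions | 6-kyu/the_most_common_letter.py | replace_common
-- ===== SOURCE A (Python) =====
-- def replace_common(st, letter):
--     freq = {}
--     indexes = {}
--     s = ''.join(st.split())
--     n = len(s)
--     max_val = float('-inf')
--     max_char = ''
--     max_index = float('-inf')
--
--     for i in range(n):
--         if s[i] not in freq:
--             freq[s[i]] = 1
--             indexes[s[i]] = i
--         else:
--             freq[s[i]] += 1
--
--     for k, v in freq.items():
--         if v > max_val or (v == max_val and indexes[k] < max_index):
--             max_val = v
--             max_char = k
--             max_index = indexes[k]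
--
--     result = st.replace(max_char, letter)
--     return result
-- ===== SOURCE B (Python) =====
-- def replace_common(st, letter):
--     # Sort the non-whitespace characters; equal characters become contiguous runs,
--     # so each run's length IS that character's frequency -- no counting pass needed.
--     s = ''.join(st.split())
--     t = sorted(s)
--     best = None  # (count, first_index_in_s, char)
--     i = 0
--     while i < len(t):
--         j = i
--         while j < len(t) and t[j] == t[i]:
--             j += 1
--         cnt = j - i
--         fi = s.index(t[i])
--         if best is None or cnt > best[0] or (cnt == best[0] and fi < best[1]):
--             best = (cnt, fi, t[i])
--         i = j
--     if best is None:
--         return st  # no non-whitespace character: nothing to replace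
--     return st.replace(best[2], letter)
-- ===== Notes on version B (the rewrite author's own statement) =====
-- stated objective: alternative
-- what changed: B replaces A's frequency/first-index dicts and dict-iteration selection loop by sorting the stripped characters and scanning the sorted list's runs once (a run's length is the character's frequency), picking the best run by (count, first occurrence); on whitespace-only input it returns st unchanged.
-- intended difference: On whitespace-only (or empty) st with letter != '', A's max_char stays '' so it returns st.replace('', letter) with letter interleaved at every position, while B returns st unchanged - the intended value, since there is no most common letter to replace. — e.g. on replace_common(" ", "x"): A returns "x x", B returns " "
import Mathlib
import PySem

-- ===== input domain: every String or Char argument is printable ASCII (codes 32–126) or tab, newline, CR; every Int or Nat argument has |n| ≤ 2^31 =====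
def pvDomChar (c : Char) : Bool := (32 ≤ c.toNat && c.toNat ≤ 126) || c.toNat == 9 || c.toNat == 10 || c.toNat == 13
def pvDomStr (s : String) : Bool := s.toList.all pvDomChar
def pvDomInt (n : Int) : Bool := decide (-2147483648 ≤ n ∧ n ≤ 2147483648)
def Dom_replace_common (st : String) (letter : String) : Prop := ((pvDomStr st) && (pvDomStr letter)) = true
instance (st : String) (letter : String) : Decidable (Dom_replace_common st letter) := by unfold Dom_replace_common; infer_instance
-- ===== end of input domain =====

-- B drops A's frequency/index dicts and selection-over-dict loop: it SORTS the
-- non-whitespace characters so each character's frequency is the length of its run,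
-- then scans the runs once (alternative decomposition, not claimed faster); on
-- whitespace-only input, where A's empty max_char makes it interleave `letter`
-- everywhere, B returns st unchanged (see D_ below).

-- ===== PORT A =====
-- first loop: freq/indexes build, one step per (s[i], i)
def rcBuild (p : PySem.Dict Char Int × PySem.Dict Char Int) (ic : Char × Nat) :
    PySem.Dict Char Int × PySem.Dict Char Int :=
  match p.1.get? ic.1 with
  | none => (p.1.insert ic.1 1, p.2.insert ic.1 (ic.2 : Int))      -- s[i] not in freq
  | some v => (p.1.insert ic.1 (v + 1), p.2)                        -- freq[s[i]] += 1

-- second loop: running (max_val, max_char, max_index); `none` is the initial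
-- (-inf, '', -inf) state, on which Python's `v > max_val` is always true.
-- indexes[k] is read with getD (k is always a key of indexes here).
def rcSelStep (indexes : PySem.Dict Char Int) (acc : Option (Int × Char × Int))
    (kv : Char × Int) : Option (Int × Char × Int) :=
  match acc with
  | none => some (kv.2, kv.1, indexes.getD kv.1 0)
  | some (mv, mc, mi) =>
      if kv.2 > mv ∨ (kv.2 = mv ∧ indexes.getD kv.1 0 < mi) then
        some (kv.2, kv.1, indexes.getD kv.1 0)
      else some (mv, mc, mi)

def replace_common (st : String) (letter : String) : String :=
  let s : List Char := PySem.Chars.join [] (PySem.Chars.split₀ st.toList)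
  let fi := s.zipIdx.foldl rcBuild (PySem.Dict.mk [], PySem.Dict.mk [])
  match fi.1.items.foldl (rcSelStep fi.2) none with
  | none => PySem.Str.replace st (String.ofList []) letter            -- max_char still ''
  | some (_, mc, _) => PySem.Str.replace st (String.ofList [mc]) letter

-- ===== PORT B =====
-- the inner `while t[j] == t[i]` scan of Source B: one run = (head char, run length);
-- recursion on the remaining suffix of the sorted list
def rcRunsGo (c : Char) (k : Nat) : List Char → List (Char × Nat)
  | [] => [(c, k)]
  | d :: r => if d == c then rcRunsGo c (k + 1) r else (c, k) :: rcRunsGo d 1 r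
def rcRuns : List Char → List (Char × Nat)
  | [] => []
  | c :: r => rcRunsGo c 1 r

-- the outer loop body of Source B, one step per run; acc = best = None | (cnt, fi, ch).
-- fi = s.index(run head); exact here: every run head occurs in s (never ValueError).
def rcBestStep (s : List Char) (acc : Option (Nat × Nat × Char)) (run : Char × Nat) :
    Option (Nat × Nat × Char) :=
  match acc with
  | none => some (run.2, s.idxOf run.1, run.1)
  | some (bc, bfi, bch) =>
      if run.2 > bc ∨ (run.2 = bc ∧ s.idxOf run.1 < bfi) then
        some (run.2, s.idxOf run.1, run.1)
      else some (bc, bfi, bch)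

def replace_common_alt (st : String) (letter : String) : String :=
  let s : List Char := PySem.Chars.join [] (PySem.Chars.split₀ st.toList)
  let t := PySem.List.sorted s (fun c => c) false
  match (rcRuns t).foldl (rcBestStep s) none with
  | none => st                                                       -- best is None
  | some (_, _, ch) => PySem.Str.replace st (String.ofList [ch]) letter

-- ===== PRECONDITION & SPEC =====
-- On whitespace-only (or empty) st with letter ≠ '', A's max_char stays '' and
-- st.replace('', letter) interleaves letter at every position, while B returns st
-- unchanged — the intended value, since there is no most common letter to replace.
def D_replace_common (st : String) (letter : String) : Prop :=
  (∀ c ∈ st.toList, PySem.Chars.isspace c = true) ∧ letter ≠ ""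
instance (st : String) (letter : String) : Decidable (D_replace_common st letter) := by
  unfold D_replace_common; infer_instance

def Spec_replace_common (st : String) (letter : String) (out : String) : Prop :=
  ¬ D_replace_common st letter → out = replace_common_alt st letter
instance (st : String) (letter : String) (out : String) : Decidable (Spec_replace_common st letter out) := by
  unfold Spec_replace_common; infer_instance

def pvDiffWitness_replace_common : String × String := (" ", "x")
def pvDiffWitnessOut_replace_common : String × String := ("x x", " ")

-- ===== CLAIM (what is proved, stated in full; the proofs are below) =====
def Claim_unchanged_replace_common : Prop := ∀ (st : String) (letter : String), Dom_replace_common st letter → Spec_replace_common st letter (replace_common st letter)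
def Claim_changed_replace_common : Prop := Dom_replace_common (pvDiffWitness_replace_common.1) (pvDiffWitness_replace_common.2) ∧ D_replace_common (pvDiffWitness_replace_common.1) (pvDiffWitness_replace_common.2) ∧ replace_common (pvDiffWitness_replace_common.1) (pvDiffWitness_replace_common.2) = pvDiffWitnessOut_replace_common.1 ∧ replace_common_alt (pvDiffWitness_replace_common.1) (pvDiffWitness_replace_common.2) = pvDiffWitnessOut_replace_common.2 ∧ pvDiffWitnessOut_replace_common.1 ≠ pvDiffWitnessOut_replace_common.2
def Claim_exact_replace_common : Prop := ∀ (st : String) (letter : String), Dom_replace_common st letter → D_replace_common st letter → replace_common st letter ≠ replace_common_alt st letter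

-- ===== LEMMAS AND PROOFS =====

-- "r beats (or ties-and-precedes) y in s": more occurrences, or as many and r's
-- first occurrence not later. Both programs return the unique character dominating
-- every character of s.
def domC (s : List Char) (r y : Char) : Prop :=
  s.count y < s.count r ∨ (s.count y = s.count r ∧ s.idxOf r ≤ s.idxOf y)

theorem domC_refl (s : List Char) (r : Char) : domC s r r := Or.inr ⟨rfl, le_rfl⟩

theorem domC_trans {s : List Char} {a b c : Char} (h1 : domC s a b) (h2 : domC s b c) :
    domC s a c := by
  rcases h1 with h1 | ⟨h1, h1'⟩ <;> rcases h2 with h2 | ⟨h2, h2'⟩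
  · exact Or.inl (lt_trans h2 h1)
  · exact Or.inl (h2 ▸ h1)
  · exact Or.inl (h1 ▸ h2)
  · exact Or.inr ⟨h2.trans h1, h1'.trans h2'⟩

theorem domC_unique {s : List Char} {r1 r2 : Char} (m1 : r1 ∈ s) (m2 : r2 ∈ s)
    (h1 : domC s r1 r2) (h2 : domC s r2 r1) : r1 = r2 := by
  have hc : s.count r1 = s.count r2 := by
    rcases h1 with h1 | ⟨h1, _⟩ <;> rcases h2 with h2 | ⟨h2, _⟩ <;> omega
  have hi : s.idxOf r1 = s.idxOf r2 := by
    rcases h1 with h1 | ⟨_, h1'⟩ <;> rcases h2 with h2 | ⟨_, h2'⟩ <;> omega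
  have l1 := List.idxOf_lt_length_of_mem m1
  calc r1 = s[s.idxOf r1] := (List.getElem_idxOf l1).symm
    _ = s[s.idxOf r2]'(hi ▸ l1) := by congr 1
    _ = r2 := List.getElem_idxOf (hi ▸ l1)

-- ---------- A-side ----------

def erasedups (seen l : List Char) : List Char :=
  match l with
  | [] => []
  | c :: r => if seen.contains c then erasedups seen r else c :: erasedups (seen ++ [c]) r

theorem foldl_add_eq_append (l : List Char) : ∀ (seen : List Char),
    List.foldl PySem.Set.add seen l = seen ++ erasedups seen l := by
  induction l with
  | nil => simp [erasedups]
  | cons c r ih =>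
    intro seen
    by_cases h : seen.contains c <;>
      simp_all [erasedups, PySem.Set.add, PySem.Set.contains]

theorem dedup_cons (x : Char) (xs : List Char) :
    PySem.List.dedup (x :: xs) = x :: erasedups [x] xs := by
  have := foldl_add_eq_append xs [x]
  simp_all [PySem.List.dedup, PySem.Set.ofList, PySem.Set.add, PySem.Set.empty, PySem.Set.contains, List.foldl_cons]

theorem mem_erasedups {y : Char} {seen l : List Char} (h : y ∈ erasedups seen l) :
    y ∈ l ∧ seen.contains y = false := by
  induction l generalizing seen with
  | nil => simp [erasedups] at h
  | cons c r ih =>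
    rw [erasedups] at h
    split at h
    · have := ih h; exact ⟨List.mem_cons_of_mem _ this.1, this.2⟩
    · rcases List.mem_cons.mp h with rfl | h2
      · exact ⟨List.mem_cons_self, eq_false_of_ne_true ‹¬ _›⟩
      · have := ih h2
        simp at this
        exact ⟨List.mem_cons_of_mem _ this.1, by simp [this.2.1]⟩

theorem pairwise_idxOf_erasedups (l : List Char) : ∀ (seen : List Char),
    (erasedups seen l).Pairwise (fun a b => l.idxOf a < l.idxOf b) := by
  induction l with
  | nil => simp [erasedups]
  | cons c r ih =>
    intro seen
    rw [erasedups]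
    split
    · -- c ∈ seen : elements of erasedups seen r avoid c
      refine (ih seen).imp_of_mem ?_
      intro a b ha hb hab
      have ha' := mem_erasedups ha; have hb' := mem_erasedups hb
      have hac : a ≠ c := by rintro rfl; simp_all
      have hbc : b ≠ c := by rintro rfl; simp_all
      simp [List.idxOf_cons, beq_iff_eq, Ne.symm hac, Ne.symm hbc]
      exact hab
    · refine List.Pairwise.cons ?_ ?_
      · intro b hb
        have hb' := mem_erasedups hb
        have hbc : b ≠ c := by rintro rfl; simp_all
        simp [List.idxOf_cons, beq_iff_eq, Ne.symm hbc]
      · refine (ih _).imp_of_mem ?_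
        intro a b ha hb hab
        have ha' := mem_erasedups ha; have hb' := mem_erasedups hb
        have hac : a ≠ c := by rintro rfl; simp_all
        have hbc : b ≠ c := by rintro rfl; simp_all
        simp [List.idxOf_cons, beq_iff_eq, Ne.symm hac, Ne.symm hbc]
        exact hab

def mfold (key : Char → ℕ) (a : Char) (l : List Char) : Char :=
  List.foldl (fun m x => if key m < key x then x else m) a l

def freqD (p : List Char) : PySem.Dict Char Int :=
  PySem.Dict.mk ((PySem.List.dedup p).map (fun c => (c, (p.count c : Int))))

def idxD (p : List Char) : PySem.Dict Char Int :=
  PySem.Dict.mk ((PySem.List.dedup p).map (fun c => (c, (p.idxOf c : Int))))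

theorem get?_mapped (d : List Char) (g : Char → Int) (k : Char) :
    PySem.Dict.get? (PySem.Dict.mk (d.map (fun c => (c, g c)))) k
      = if k ∈ d then some (g k) else none := by
  induction d with
  | nil => rfl
  | cons c r ih =>
    by_cases h : k = c
    · subst h; simp [PySem.Dict.get?, PySem.Dict.items]
    · simp_all [PySem.Dict.get?, PySem.Dict.items, List.find?_cons, Ne.symm h, h]

theorem mem_dedup' (p : List Char) (c : Char) : c ∈ PySem.List.dedup p ↔ c ∈ p :=
  PySem.Set.mem_ofList p c

theorem contains_mapped (d : List Char) (g : Char → Int) (k : Char) :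
    PySem.Dict.contains (PySem.Dict.mk (d.map (fun c => (c, g c)))) k = decide (k ∈ d) := by
  simp [PySem.Dict.contains, PySem.Dict.items, List.any_eq, beq_iff_eq]

theorem dedup_append_mem {p : List Char} {c : Char} (h : c ∈ p) :
    PySem.List.dedup (p ++ [c]) = PySem.List.dedup p := by
  have h1 : PySem.Set.ofList (p ++ [c]) = PySem.Set.add (PySem.Set.ofList p) c := by
    simp [PySem.Set.ofList, List.foldl_append]
  have h2 : (PySem.Set.ofList p).contains c = true := by
    simpa [PySem.Set.contains, List.contains_iff_mem] using (PySem.Set.mem_ofList p c).mpr h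
  rw [PySem.List.dedup, h1, PySem.Set.add, if_pos h2]; rfl

theorem dedup_append_not_mem {p : List Char} {c : Char} (h : c ∉ p) :
    PySem.List.dedup (p ++ [c]) = PySem.List.dedup p ++ [c] := by
  have h1 : PySem.Set.ofList (p ++ [c]) = PySem.Set.add (PySem.Set.ofList p) c := by
    simp [PySem.Set.ofList, List.foldl_append]
  have h2 : ¬ (PySem.Set.ofList p).contains c = true := by
    simp [PySem.Set.contains, List.contains_iff_mem]
    exact h
  rw [PySem.List.dedup, h1, PySem.Set.add, if_neg h2]; rfl

theorem insert_mapped_mem {d : List Char} {c : Char} (g : Char → Int) (v : Int) (h : c ∈ d) :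
    PySem.Dict.insert (PySem.Dict.mk (d.map (fun x => (x, g x)))) c v
      = PySem.Dict.mk (d.map (fun x => if x = c then (c, v) else (x, g x))) := by
  rw [PySem.Dict.insert, if_pos (by simp [contains_mapped, h])]
  simp only [PySem.Dict.items, List.map_map]
  congr 1
  refine List.map_congr_left ?_
  intro x hx
  by_cases hxc : x = c <;> simp [Function.comp, hxc, beq_iff_eq]

theorem insert_mapped_not_mem {d : List Char} {c : Char} (g : Char → Int) (v : Int) (h : c ∉ d) :
    PySem.Dict.insert (PySem.Dict.mk (d.map (fun x => (x, g x)))) c v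
      = PySem.Dict.mk (d.map (fun x => (x, g x)) ++ [(c, v)]) := by
  rw [PySem.Dict.insert, if_neg (by simp [contains_mapped, h])]

theorem build_step (p : List Char) (c : Char) :
    rcBuild (freqD p, idxD p) (c, p.length) = (freqD (p ++ [c]), idxD (p ++ [c])) := by
  by_cases hc : c ∈ p
  · have hcd : c ∈ PySem.List.dedup p := (mem_dedup' p c).mpr hc
    rw [rcBuild]
    simp only [freqD, idxD, get?_mapped, mem_dedup', hc, if_pos]
    rw [insert_mapped_mem _ _ hcd]
    have e1 : (PySem.List.dedup (p ++ [c])).map (fun x => (x, ((p ++ [c]).count x : Int)))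
        = (PySem.List.dedup p).map
          (fun x => if x = c then (c, (p.count c : Int) + 1) else (x, (p.count x : Int))) := by
      rw [dedup_append_mem hc]
      refine List.map_congr_left ?_
      intro x hx
      by_cases hxc : x = c
      · subst hxc
        simp [List.count_append, List.count_singleton]
      · simp [hxc, Ne.symm hxc, List.count_append, List.count_singleton, beq_iff_eq]
    have e2 : (PySem.List.dedup (p ++ [c])).map (fun x => (x, ((p ++ [c]).idxOf x : Int)))
        = (PySem.List.dedup p).map (fun x => (x, (p.idxOf x : Int))) := by
      rw [dedup_append_mem hc]
      refine List.map_congr_left ?_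
      intro x hx
      have hxp : x ∈ p := (mem_dedup' p x).mp hx
      simp [List.idxOf_append, hxp]
    rw [e1, e2]
  · have hcd : c ∉ PySem.List.dedup p := fun h => hc ((mem_dedup' p c).mp h)
    rw [rcBuild]
    simp only [freqD, idxD, get?_mapped, mem_dedup', hc, if_neg, if_false]
    rw [insert_mapped_not_mem _ _ hcd, insert_mapped_not_mem _ _ hcd]
    have e1 : (PySem.List.dedup (p ++ [c])).map (fun x => (x, ((p ++ [c]).count x : Int)))
        = (PySem.List.dedup p).map (fun x => (x, (p.count x : Int))) ++ [(c, 1)] := by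
      rw [dedup_append_not_mem hc, List.map_append]
      congr 1
      · refine List.map_congr_left ?_
        intro x hx
        have hxp : x ∈ p := (mem_dedup' p x).mp hx
        have hxc : x ≠ c := fun h => hc (h ▸ hxp)
        simp [List.count_append, List.count_singleton, Ne.symm hxc, beq_iff_eq]
      · simp [List.count_append, List.count_singleton, List.count_eq_zero.mpr hc]
    have e2 : (PySem.List.dedup (p ++ [c])).map (fun x => (x, ((p ++ [c]).idxOf x : Int)))
        = (PySem.List.dedup p).map (fun x => (x, (p.idxOf x : Int))) ++ [(c, (p.length : Int))] := by
      rw [dedup_append_not_mem hc, List.map_append]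
      congr 1
      · refine List.map_congr_left ?_
        intro x hx
        have hxp : x ∈ p := (mem_dedup' p x).mp hx
        simp [List.idxOf_append, hxp]
      · simp [List.idxOf_append, hc]
    rw [e1, e2]

theorem build_invariant (l : List Char) :
    ∀ (p : List Char),
    List.foldl rcBuild (freqD p, idxD p) (l.zipIdx p.length) = (freqD (p ++ l), idxD (p ++ l)) := by
  induction l with
  | nil => intro p; simp
  | cons c r ih =>
    intro p
    rw [List.zipIdx_cons, List.foldl_cons, build_step]
    have h1 : p.length + 1 = (p ++ [c]).length := by simp
    have h2 : p ++ c :: r = (p ++ [c]) ++ r := by simp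
    rw [h1, h2]
    exact ih (p ++ [c])

theorem getD_idxD {s : List Char} {x : Char} (h : x ∈ PySem.List.dedup s) :
    PySem.Dict.getD (idxD s) x 0 = (s.idxOf x : Int) := by
  rw [PySem.Dict.getD, idxD, get?_mapped, if_pos h, Option.getD_some]

theorem sel_fold (s : List Char) (d : List Char) :
    ∀ (m : Char),
    (∀ x ∈ d, x ∈ PySem.List.dedup s) →
    (∀ x ∈ d, s.idxOf m < s.idxOf x) →
    d.Pairwise (fun a b => s.idxOf a < s.idxOf b) →
    List.foldl (rcSelStep (idxD s)) (some ((s.count m : Int), m, (s.idxOf m : Int)))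
        (d.map (fun c => (c, (s.count c : Int))))
      = some ((s.count (mfold (fun c => s.count c) m d) : Int), mfold (fun c => s.count c) m d,
              (s.idxOf (mfold (fun c => s.count c) m d) : Int)) := by
  induction d with
  | nil => intro m _ _ _; rfl
  | cons x r ih =>
    intro m hmem hinc hp
    rw [List.map_cons, List.foldl_cons, mfold, List.foldl_cons]
    have hgd : PySem.Dict.getD (idxD s) x 0 = (s.idxOf x : Int) :=
      getD_idxD (hmem x List.mem_cons_self)
    have hxm : s.idxOf m < s.idxOf x := hinc x List.mem_cons_self
    by_cases hlt : s.count m < s.count x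
    · have hcond : ((s.count x : Int) > (s.count m : Int) ∨
          ((s.count x : Int) = (s.count m : Int) ∧ PySem.Dict.getD (idxD s) x 0 < (s.idxOf m : Int))) := by
        left; exact_mod_cast hlt
      rw [rcSelStep, if_pos hcond, hgd, if_pos hlt]
      exact ih x (fun y hy => hmem y (List.mem_cons_of_mem _ hy))
        (fun y hy => (List.pairwise_cons.mp hp).1 y hy)
        (List.pairwise_cons.mp hp).2
    · have hcond : ¬ ((s.count x : Int) > (s.count m : Int) ∨
          ((s.count x : Int) = (s.count m : Int) ∧ PySem.Dict.getD (idxD s) x 0 < (s.idxOf m : Int))) := by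
        rw [hgd]
        push Not
        refine ⟨by exact_mod_cast not_lt.mp hlt, fun _ => by exact_mod_cast le_of_lt hxm⟩
      rw [rcSelStep, if_neg hcond, if_neg hlt]
      exact ih m (fun y hy => hmem y (List.mem_cons_of_mem _ hy))
        (fun y hy => hinc y (List.mem_cons_of_mem _ hy))
        (List.pairwise_cons.mp hp).2

-- A's selection (first maximum of count, in first-occurrence order) dominates
-- everything it scanned, in the sense of domC.
theorem mfold_cons (key : Char → Nat) (a x : Char) (rest : List Char) :
    mfold key a (x :: rest) = mfold key (if key a < key x then x else a) rest := by
  rw [mfold, List.foldl_cons]; rfl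

theorem mfold_spec (s : List Char) (l : List Char) : ∀ (a : Char),
    (∀ z ∈ l, s.idxOf a < s.idxOf z) → l.Pairwise (fun p q => s.idxOf p < s.idxOf q) →
    (mfold (fun c => s.count c) a l ∈ a :: l) ∧
    ∀ y ∈ a :: l, domC s (mfold (fun c => s.count c) a l) y := by
  induction l with
  | nil =>
    intro a _ _
    refine ⟨List.mem_cons_self, ?_⟩
    intro y hy
    rcases List.mem_cons.mp hy with rfl | h
    · exact domC_refl s y
    · simp at h
  | cons x rest ih =>
    intro a hinc hp
    rw [mfold_cons]
    by_cases hlt : s.count a < s.count x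
    · rw [if_pos hlt]
      obtain ⟨hm, hd⟩ := ih x (fun z hz => (List.pairwise_cons.mp hp).1 z hz)
        (List.pairwise_cons.mp hp).2
      refine ⟨?_, ?_⟩
      · rcases List.mem_cons.mp hm with h | h
        · rw [h]; exact List.mem_cons_of_mem _ List.mem_cons_self
        · exact List.mem_cons_of_mem _ (List.mem_cons_of_mem _ h)
      · intro y hy
        rcases List.mem_cons.mp hy with rfl | hy2
        · exact domC_trans (hd x List.mem_cons_self) (Or.inl hlt)
        · exact hd y hy2
    · rw [if_neg hlt]
      obtain ⟨hm, hd⟩ := ih a (fun z hz => hinc z (List.mem_cons_of_mem _ hz))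
        (List.pairwise_cons.mp hp).2
      refine ⟨?_, ?_⟩
      · rcases List.mem_cons.mp hm with h | h
        · rw [h]; exact List.mem_cons_self
        · exact List.mem_cons_of_mem _ (List.mem_cons_of_mem _ h)
      · intro y hy
        rcases List.mem_cons.mp hy with rfl | hy2
        · exact hd y List.mem_cons_self
        · rcases List.mem_cons.mp hy2 with rfl | hy3
          · refine domC_trans (hd a List.mem_cons_self) ?_
            rcases Nat.lt_or_ge (s.count y) (s.count a) with h | h
            · exact Or.inl h
            · exact Or.inr ⟨Nat.le_antisymm (not_lt.mp hlt) h,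
                le_of_lt (hinc y List.mem_cons_self)⟩
          · exact hd y (List.mem_cons_of_mem _ hy3)

-- ---------- B-side ----------

theorem rcRunsGo_eq (r : List Char) : ∀ (c : Char) (k : Nat),
    rcRunsGo c k r = (c, (r.takeWhile (fun d => d == c)).length + k)
      :: rcRuns (r.dropWhile (fun d => d == c)) := by
  induction r with
  | nil => intro c k; simp [rcRunsGo, rcRuns]
  | cons d r' ih =>
    intro c k
    by_cases hdc : d = c
    · subst hdc
      rw [rcRunsGo, if_pos (by simp), ih d (k + 1),
        List.takeWhile_cons_of_pos (by simp), List.dropWhile_cons_of_pos (by simp)]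
      simp [Nat.add_assoc, Nat.add_comm 1 k]
    · rw [rcRunsGo, if_neg (by simp [hdc]),
        List.takeWhile_cons_of_neg (by simp [hdc]), List.dropWhile_cons_of_neg (by simp [hdc])]
      simp [rcRuns]

-- the run decomposition the inner while loop performs
theorem rcRuns_cons (c : Char) (r : List Char) :
    rcRuns (c :: r) = (c, (r.takeWhile (fun d => d == c)).length + 1)
      :: rcRuns (r.dropWhile (fun d => d == c)) := by
  rw [rcRuns, rcRunsGo_eq]

theorem dropWhile_head_false {p : Char → Bool} {l tl : List Char} {h0 : Char}
    (h : l.dropWhile p = h0 :: tl) : p h0 = false := by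
  induction l with
  | nil => simp [List.dropWhile] at h
  | cons a l' ih =>
    rw [List.dropWhile_cons] at h
    by_cases ha : p a
    · rw [if_pos ha] at h; exact ih h
    · rw [if_neg ha] at h
      cases h
      exact eq_false_of_ne_true ha

theorem mem_runs_heads_aux : ∀ (n : Nat) (t : List Char), t.length ≤ n →
    ∀ y ∈ t, y ∈ (rcRuns t).map Prod.fst := by
  intro n
  induction n with
  | zero =>
    intro t ht y hy
    rw [List.length_eq_zero_iff.mp (Nat.le_zero.mp ht)] at hy
    simp at hy
  | succ n ih =>
    intro t ht y hy
    cases t with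
    | nil => simp at hy
    | cons c r =>
      rw [rcRuns_cons, List.map_cons]
      rcases List.mem_cons.mp hy with rfl | hy2
      · exact List.mem_cons_self
      · rw [← List.takeWhile_append_dropWhile (p := fun d => d == c) (l := r)] at hy2
        rcases List.mem_append.mp hy2 with h | h
        · have := List.mem_takeWhile_imp h
          simp at this
          exact this ▸ List.mem_cons_self
        · refine List.mem_cons_of_mem _ (ih _ ?_ y h)
          simp only [List.length_cons] at ht
          exact le_trans (List.length_dropWhile_le _ _) (by omega)

theorem mem_runs_heads (t : List Char) (y : Char) (hy : y ∈ t) :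
    y ∈ (rcRuns t).map Prod.fst :=
  mem_runs_heads_aux t.length t le_rfl y hy

theorem runs_heads_mem_aux : ∀ (n : Nat) (t : List Char), t.length ≤ n →
    ∀ p ∈ rcRuns t, p.1 ∈ t := by
  intro n
  induction n with
  | zero =>
    intro t ht p hp
    rw [List.length_eq_zero_iff.mp (Nat.le_zero.mp ht)] at hp
    simp [rcRuns] at hp
  | succ n ih =>
    intro t ht p hp
    cases t with
    | nil => simp [rcRuns] at hp
    | cons c r =>
      rw [rcRuns_cons] at hp
      rcases List.mem_cons.mp hp with rfl | hp2
      · exact List.mem_cons_self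
      · refine List.mem_cons_of_mem _ ((List.dropWhile_sublist _).subset (ih _ ?_ p hp2))
        simp only [List.length_cons] at ht
        exact le_trans (List.length_dropWhile_le _ _) (by omega)

theorem runs_heads_mem (t : List Char) (p : Char × Nat) (hp : p ∈ rcRuns t) : p.1 ∈ t :=
  runs_heads_mem_aux t.length t le_rfl p hp

theorem count_takeWhile (c : Char) : ∀ (r : List Char), r.Pairwise (· ≤ ·) →
    (∀ z ∈ r, c ≤ z) → r.count c = (r.takeWhile (fun d => d == c)).length := by
  intro r
  induction r with
  | nil => intro _ _; rfl
  | cons x r' ih =>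
    intro hp hge
    by_cases hx : x = c
    · subst hx
      rw [List.count_cons_self, List.takeWhile_cons_of_pos (by simp), List.length_cons,
        ih (List.pairwise_cons.mp hp).2 (fun z hz => hge z (List.mem_cons_of_mem _ hz))]
    · have hcx : c < x := lt_of_le_of_ne (hge x List.mem_cons_self) (Ne.symm hx)
      rw [List.takeWhile_cons_of_neg (by simp [hx]), List.count_cons_of_ne hx]
      rw [List.length_nil, List.count_eq_zero]
      intro hc
      exact absurd (lt_of_lt_of_le hcx ((List.pairwise_cons.mp hp).1 c hc)) (lt_irrefl c)

-- on a sorted list every run's recorded length is the character's count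
theorem runs_count_aux : ∀ (n : Nat) (t : List Char), t.length ≤ n → t.Pairwise (· ≤ ·) →
    ∀ p ∈ rcRuns t, p.2 = t.count p.1 := by
  intro n
  induction n with
  | zero =>
    intro t ht _ p hp
    rw [List.length_eq_zero_iff.mp (Nat.le_zero.mp ht)] at hp
    simp [rcRuns] at hp
  | succ n ih =>
    intro t ht hpair p hmem
    cases t with
    | nil => simp [rcRuns] at hmem
    | cons c r =>
      obtain ⟨hhead, htail⟩ := List.pairwise_cons.mp hpair
      rw [rcRuns_cons] at hmem
      have hdwlen : (r.dropWhile (fun d => d == c)).length ≤ n := by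
        simp only [List.length_cons] at ht
        exact le_trans (List.length_dropWhile_le _ _) (by omega)
      rcases List.mem_cons.mp hmem with rfl | hp2
      · show _ + 1 = _
        rw [List.count_cons_self, ← count_takeWhile c r htail hhead]
      · have hdw_pair : (r.dropWhile (fun d => d == c)).Pairwise (· ≤ ·) :=
          htail.sublist (List.dropWhile_sublist _)
        have hres := ih _ hdwlen hdw_pair p hp2
        have hp1mem : p.1 ∈ r.dropWhile (fun d => d == c) :=
          runs_heads_mem _ p hp2
        -- every element of the dropWhile suffix is > c
        have hgt : ∀ z ∈ r.dropWhile (fun d => d == c), c < z := by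
          intro z hz
          cases hdw : r.dropWhile (fun d => d == c) with
          | nil => rw [hdw] at hz; simp at hz
          | cons h0 tl =>
            have hh0r : h0 ∈ r := (List.dropWhile_sublist _).subset (hdw ▸ List.mem_cons_self)
            have hne := dropWhile_head_false hdw
            simp only [beq_iff_eq] at hne
            have hch0 : c < h0 :=
              lt_of_le_of_ne (hhead h0 hh0r) (Ne.symm (by simpa using hne))
            rw [hdw] at hz
            rcases List.mem_cons.mp hz with rfl | hz2
            · exact hch0
            · have := (List.pairwise_cons.mp (hdw ▸ hdw_pair)).1 z hz2
              exact lt_of_lt_of_le hch0 this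
        have hne_c : p.1 ≠ c := fun h => absurd (h ▸ hgt p.1 hp1mem) (lt_irrefl c)
        rw [hres, List.count_cons_of_ne (Ne.symm hne_c)]
        -- count in r = count in the dropWhile suffix (the takeWhile prefix is all c)
        conv_rhs => rw [← List.takeWhile_append_dropWhile (p := fun d => d == c) (l := r)]
        rw [List.count_append]
        have htw0 : (r.takeWhile (fun d => d == c)).count p.1 = 0 := by
          rw [List.count_eq_zero]
          intro hmem2
          have := List.mem_takeWhile_imp hmem2
          simp at this
          exact hne_c this
        omega

theorem runs_count (t : List Char) (h : t.Pairwise (· ≤ ·)) :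
    ∀ p ∈ rcRuns t, p.2 = t.count p.1 :=
  runs_count_aux t.length t le_rfl h

-- the outer-loop fold keeps a triple (count best, idxOf best, best) dominating
-- everything scanned so far
theorem bfold (s : List Char) : ∀ (rs : List (Char × Nat)),
    (∀ p ∈ rs, p.2 = s.count p.1) → ∀ (m : Char),
    ∃ r, List.foldl (rcBestStep s) (some (s.count m, s.idxOf m, m)) rs
        = some (s.count r, s.idxOf r, r)
      ∧ (r = m ∨ r ∈ rs.map Prod.fst)
      ∧ ∀ y, (y = m ∨ y ∈ rs.map Prod.fst) → domC s r y := by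
  intro rs
  induction rs with
  | nil =>
    intro _ m
    refine ⟨m, rfl, Or.inl rfl, ?_⟩
    rintro y (rfl | hy)
    · exact domC_refl s y
    · simp at hy
  | cons q rest ih =>
    intro hc m
    obtain ⟨c, n⟩ := q
    have hn : n = s.count c := hc (c, n) List.mem_cons_self
    have hc' : ∀ p ∈ rest, p.2 = s.count p.1 := fun p hp => hc p (List.mem_cons_of_mem _ hp)
    rw [List.foldl_cons]
    show ∃ r, List.foldl (rcBestStep s)
        (if n > s.count m ∨ (n = s.count m ∧ s.idxOf c < s.idxOf m)
          then some (n, s.idxOf c, c) else some (s.count m, s.idxOf m, m)) rest = _ ∧ _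
    by_cases hcond : n > s.count m ∨ (n = s.count m ∧ s.idxOf c < s.idxOf m)
    · rw [if_pos hcond, hn]
      obtain ⟨r, hr, hrm, hrd⟩ := ih hc' c
      refine ⟨r, hr, ?_, ?_⟩
      · rcases hrm with rfl | h
        · exact Or.inr (by simp)
        · exact Or.inr (by rw [List.map_cons]; exact List.mem_cons_of_mem _ h)
      · have hdcm : domC s c m := by
          rcases hcond with h | ⟨h, h2⟩
          · exact Or.inl (hn ▸ h)
          · exact Or.inr ⟨(hn ▸ h).symm, le_of_lt h2⟩
        rintro y (rfl | hy)
        · exact domC_trans (hrd c (Or.inl rfl)) hdcm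
        · rw [List.map_cons] at hy
          rcases List.mem_cons.mp hy with rfl | hy2
          · exact hrd y (Or.inl rfl)
          · exact hrd y (Or.inr hy2)
    · rw [if_neg hcond]
      obtain ⟨r, hr, hrm, hrd⟩ := ih hc' m
      refine ⟨r, hr, ?_, ?_⟩
      · rcases hrm with rfl | h
        · exact Or.inl rfl
        · exact Or.inr (by rw [List.map_cons]; exact List.mem_cons_of_mem _ h)
      · have hdmc : domC s m c := by
          push Not at hcond
          rcases Nat.lt_or_ge (s.count c) (s.count m) with h | h
          · exact Or.inl h
          · have heq : s.count c = s.count m := Nat.le_antisymm (hn ▸ hcond.1) h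
            exact Or.inr ⟨heq, hcond.2 (heq ▸ hn)⟩
        rintro y (rfl | hy)
        · exact hrd y (Or.inl rfl)
        · rw [List.map_cons] at hy
          rcases List.mem_cons.mp hy with rfl | hy2
          · exact domC_trans (hrd m (Or.inl rfl)) hdmc
          · exact hrd y (Or.inr hy2)

-- B's fold over the runs of sorted s returns the domC-maximum of s
theorem B_char (s : List Char) (x : Char) (xs : List Char) (hs : s = x :: xs) :
    ∃ r, (rcRuns (PySem.List.sorted s (fun c => c) false)).foldl (rcBestStep s) none
        = some (s.count r, s.idxOf r, r)
      ∧ r ∈ s ∧ ∀ y ∈ s, domC s r y := by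
  set t := PySem.List.sorted s (fun c => c) false with ht
  have hperm : t.Perm s := PySem.List.sorted_perm s _ _
  have hpair : t.Pairwise (· ≤ ·) := by
    have := PySem.List.sorted_pairwise s (fun c => c)
    simpa using this
  have hcount : ∀ c : Char, t.count c = s.count c := fun c => hperm.count_eq c
  have htne : t ≠ [] := by
    intro h
    rw [h] at hperm
    rw [hs] at hperm
    exact absurd hperm.length_eq (by simp)
  obtain ⟨c0, r0, ht0⟩ := List.exists_cons_of_ne_nil htne
  have hruns : rcRuns t = (c0, (r0.takeWhile (fun d => d == c0)).length + 1)
      :: rcRuns (r0.dropWhile (fun d => d == c0)) := by rw [ht0, rcRuns_cons]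
  have hall : ∀ p ∈ rcRuns t, p.2 = s.count p.1 := by
    intro p hp
    rw [runs_count t hpair p hp, hcount]
  have hn0 : (r0.takeWhile (fun d => d == c0)).length + 1 = s.count c0 :=
    hall _ (hruns ▸ List.mem_cons_self)
  rw [hruns, List.foldl_cons]
  show ∃ r, List.foldl (rcBestStep s)
      (some ((r0.takeWhile (fun d => d == c0)).length + 1, s.idxOf c0, c0)) _ = _ ∧ _
  rw [hn0]
  obtain ⟨r, hr, hrm, hrd⟩ := bfold s (rcRuns (r0.dropWhile (fun d => d == c0)))
    (fun p hp => hall p (hruns ▸ List.mem_cons_of_mem _ hp)) c0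
  refine ⟨r, hr, ?_, ?_⟩
  · have hrt : r ∈ t := by
      rcases hrm with rfl | h
      · rw [ht0]; exact List.mem_cons_self
      · obtain ⟨p, hp, hp1⟩ := List.mem_map.mp h
        have : p.1 ∈ r0.dropWhile (fun d => d == c0) := runs_heads_mem _ p hp
        rw [ht0]
        exact List.mem_cons_of_mem _ (hp1 ▸ (List.dropWhile_sublist _).subset this)
    exact hperm.subset hrt
  · intro y hy
    have hyt : y ∈ t := hperm.mem_iff.mpr hy
    have := mem_runs_heads t y hyt
    rw [hruns, List.map_cons] at this
    rcases List.mem_cons.mp this with rfl | h2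
    · exact hrd y (Or.inl rfl)
    · exact hrd y (Or.inr h2)

-- ---------- joining the whitespace split ----------

theorem split_go' (rest : List Char) : ∀ (cur : List Char) (acc : List (List Char)),
    (PySem.Chars.split₀.go rest cur acc).flatten
      = acc.reverse.flatten ++ cur.reverse ++ rest.filter (fun c => !PySem.Chars.isspace c) := by
  induction rest with
  | nil =>
    intro cur acc
    by_cases h : cur.isEmpty <;> simp_all [PySem.Chars.split₀.go, List.isEmpty_iff]
  | cons c r ih =>
    intro cur acc
    by_cases hs : PySem.Chars.isspace c
    · by_cases h : cur.isEmpty <;> simp_all [PySem.Chars.split₀.go, List.isEmpty_iff]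
    · simp_all [PySem.Chars.split₀.go]

theorem inter_nil (xss : List (List Char)) : (List.intersperse ([]:List Char) xss).flatten = xss.flatten := by
  induction xss with
  | nil => rfl
  | cons x r ih => cases r <;> simp_all

theorem join_split₀_filter (l : List Char) :
    PySem.Chars.join [] (PySem.Chars.split₀ l) = l.filter (fun c => !PySem.Chars.isspace c) := by
  rw [PySem.Chars.join, List.intercalate, inter_nil, PySem.Chars.split₀, split_go']
  simp

-- ---------- the difference witness, evaluated piece by piece ----------

theorem changed_dom : Dom_replace_common " " "x" := by rfl
theorem changed_D : D_replace_common " " "x" := by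
  refine ⟨?_, by simp⟩
  intro c hc
  have : c = ' ' := by simpa using hc
  subst this
  rfl
set_option maxRecDepth 100000 in
theorem changed_val_A : replace_common " " "x" = "x x" := by decide
set_option maxRecDepth 100000 in
theorem changed_val_B : replace_common_alt " " "x" = " " := by decide
theorem changed_ne : "x x" ≠ (" " : String) := by simp

-- ---------- the two sides agree on a non-empty stripped string ----------

theorem eq_nonempty (st letter : String) (x : Char) (xs : List Char)
    (hs : st.toList.filter (fun c => !PySem.Chars.isspace c) = x :: xs) :
    replace_common st letter = replace_common_alt st letter := by
  set s : List Char := x :: xs with hsdef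
  have hdds : PySem.List.dedup s = x :: erasedups [x] xs := dedup_cons x xs
  have hne : ∀ y ∈ erasedups [x] xs, y ≠ x := by
    intro y hy h
    have h2 := (mem_erasedups hy).2
    subst h
    simp at h2
  have hmem : ∀ y ∈ erasedups [x] xs, y ∈ PySem.List.dedup s := by
    intro y hy; rw [hdds]; exact List.mem_cons_of_mem _ hy
  have hinc : ∀ y ∈ erasedups [x] xs, s.idxOf x < s.idxOf y := by
    intro y hy
    simp [hsdef, List.idxOf_cons, beq_iff_eq, Ne.symm (hne y hy)]
  have hp : (erasedups [x] xs).Pairwise (fun a b => s.idxOf a < s.idxOf b) := by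
    refine (pairwise_idxOf_erasedups xs [x]).imp_of_mem ?_
    intro a b ha hb hab
    simp [hsdef, List.idxOf_cons, beq_iff_eq, Ne.symm (hne a ha), Ne.symm (hne b hb)]
    exact hab
  have hxdd : x ∈ PySem.List.dedup s := by rw [hdds]; exact List.mem_cons_self
  set mA : Char := mfold (fun c => s.count c) x (erasedups [x] xs) with hmA
  -- A side computes mA
  have hA : replace_common st letter = PySem.Str.replace st (String.ofList [mA]) letter := by
    simp only [replace_common, join_split₀_filter, hs]
    have hbuild := build_invariant s []
    simp only [List.length_nil, List.nil_append] at hbuild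
    rw [show (freqD [], idxD []) = ((PySem.Dict.mk [] : PySem.Dict Char Int), (PySem.Dict.mk [] : PySem.Dict Char Int)) from rfl] at hbuild
    rw [hbuild]
    have hitems : (freqD s).items = (x :: erasedups [x] xs).map (fun c => (c, (s.count c : Int))) := by
      show (PySem.List.dedup s).map _ = _
      rw [hdds]
    rw [hitems, List.map_cons, List.foldl_cons]
    have hstep : rcSelStep (idxD s) none (x, (s.count x : Int))
        = some ((s.count x : Int), x, (s.idxOf x : Int)) := by
      rw [rcSelStep, getD_idxD hxdd]
    rw [hstep, sel_fold s (erasedups [x] xs) x hmem hinc hp]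
  -- A's character dominates every character of s
  obtain ⟨hAm, hAd⟩ := mfold_spec s (erasedups [x] xs) x hinc hp
  have hAmem : mA ∈ s := by
    have : mA ∈ x :: erasedups [x] xs := hAm
    rw [← hdds] at this
    exact (mem_dedup' s mA).mp this
  have hAdom : ∀ y ∈ s, domC s mA y := by
    intro y hy
    have : y ∈ x :: erasedups [x] xs := hdds ▸ (mem_dedup' s y).mpr hy
    exact hAd y this
  -- B side computes some r with the same property
  obtain ⟨r, hr, hrmem, hrdom⟩ := B_char s x xs hsdef
  have hB : replace_common_alt st letter = PySem.Str.replace st (String.ofList [r]) letter := by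
    simp only [replace_common_alt, join_split₀_filter, hs, ← hsdef]
    rw [hr]
  -- uniqueness of the domC-maximum
  have : mA = r := domC_unique hAmem hrmem (hAdom r hrmem) (hrdom mA hAmem)
  rw [hA, hB, this]

-- when s is empty the selected "character" is the empty string; A computes st.replace('', letter)
theorem A_empty (st letter : String)
    (hf : st.toList.filter (fun c => !PySem.Chars.isspace c) = []) :
    replace_common st letter = PySem.Str.replace st (String.ofList []) letter := by
  simp only [replace_common, join_split₀_filter, hf]
  rfl

theorem B_empty (st letter : String)
    (hf : st.toList.filter (fun c => !PySem.Chars.isspace c) = []) :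
    replace_common_alt st letter = st := by
  simp only [replace_common_alt, join_split₀_filter, hf]
  rfl

theorem length_flatMap_cons (new l : List Char) :
    (l.flatMap (fun c => c :: new)).length = l.length * (new.length + 1) := by
  induction l with
  | nil => simp
  | cons c r ih => simp [List.flatMap_cons, ih]; ring

theorem filter_nil_of_ws {st : String} (hws : ∀ c ∈ st.toList, PySem.Chars.isspace c = true) :
    st.toList.filter (fun c => !PySem.Chars.isspace c) = [] := by
  rw [List.filter_eq_nil_iff]
  intro c hc
  simp [hws c hc]

-- ===== VERDICT (by name: the statement is the Claim_ definition above) =====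
theorem replace_common_spec : Claim_unchanged_replace_common := by
  intro st letter _ hD
  cases hf : st.toList.filter (fun c => !PySem.Chars.isspace c) with
  | cons x xs => exact eq_nonempty st letter x xs hf
  | nil =>
    have hws : ∀ c ∈ st.toList, PySem.Chars.isspace c = true := by
      intro c hc
      by_contra h
      have hm : c ∈ st.toList.filter (fun c => !PySem.Chars.isspace c) :=
        List.mem_filter.mpr ⟨hc, by simp [h]⟩
      rw [hf] at hm
      simp at hm
    have hletter : letter = "" := by
      by_contra h
      exact hD ⟨hws, h⟩
    subst hletter
    rw [A_empty st _ hf, B_empty st _ hf]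
    apply String.toList_inj.mp
    rw [PySem.Str.replace]
    simp [PySem.Chars.replace]

theorem replace_common_changed : Claim_changed_replace_common := by
  unfold Claim_changed_replace_common
  exact ⟨changed_dom, changed_D, changed_val_A, changed_val_B, changed_ne⟩

theorem replace_common_tight : Claim_exact_replace_common := by
  intro st letter _ hD heq
  obtain ⟨hws, hletter⟩ := hD
  have hf := filter_nil_of_ws hws
  rw [A_empty st _ hf, B_empty st _ hf] at heq
  have hlist := String.toList_inj.mpr heq
  rw [PySem.Str.replace] at hlist
  simp only [String.toList_ofList] at hlist
  have hrep : PySem.Chars.replace st.toList [] letter.toList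
      = letter.toList ++ st.toList.flatMap (fun c => c :: letter.toList) := by
    rw [PySem.Chars.replace]
    simp
  rw [hrep] at hlist
  have hlen := congrArg List.length hlist
  simp only [List.length_append, length_flatMap_cons] at hlen
  have hL : letter.toList ≠ [] := by
    intro h
    exact hletter (String.toList_inj.mp (by simpa using h))
  have hL1 : 0 < letter.toList.length := List.length_pos_iff.mpr hL
  rw [Nat.mul_add, Nat.mul_one] at hlen
  omega
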